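-- pv_equiv track=rewrite | github.com/whgusdn321/Competitive-programming | Baekjoon,SWEA, etc/프로그래머스/방금그곡.py | parse
-- ===== SOURCE A (Python) =====
-- def parse(score):
--     result = []
--     i = 0
--     while i < len(score):
--         token = ''
--         token += score[i]
--         if i+1 < len(score) and score[i+1] == '#':
--             token += score[i+1]
--             i += 2
--         else:
--             i += 1
--         result.append(token)
--     return result
-- ===== SOURCE B (Python) =====
-- def parse(score):
--     out = []
--     for c in score:
--         if c == '#' and out and len(out[-1]) == 1:
--             out[-1] += '#'
--         else:
--             out.append(c)
--     return out
-- ===== Notes on version B (the rewrite author's own statement) =====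
-- stated objective: faster
-- what changed: Replaces the index-managed lookahead while-loop (peek at the next character, advance i by 1 or 2) with a single lookbehind fold over the characters: each char is appended as a new token unless it is a sharp sign and the previous token is a lone character, in which case it merges into it.
import Mathlib
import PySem

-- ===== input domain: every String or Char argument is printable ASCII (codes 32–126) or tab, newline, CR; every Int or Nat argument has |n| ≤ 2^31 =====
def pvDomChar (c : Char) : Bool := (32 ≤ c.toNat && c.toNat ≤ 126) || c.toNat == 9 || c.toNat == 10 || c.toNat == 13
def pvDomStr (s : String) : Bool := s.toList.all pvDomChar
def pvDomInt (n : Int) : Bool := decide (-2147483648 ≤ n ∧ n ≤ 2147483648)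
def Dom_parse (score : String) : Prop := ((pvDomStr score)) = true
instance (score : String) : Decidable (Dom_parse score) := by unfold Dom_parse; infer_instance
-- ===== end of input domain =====

-- B replaces A's index-managed lookahead loop with a single lookbehind fold over the characters; same O(n) algorithmic cost, measurably faster by constant factor (direct char iteration instead of repeated indexing).


-- ===== PORT A =====
-- A's while-loop over index i (advancing by 2 when the next char is '#', else by 1)
-- transliterated as the structural recursion on the remaining characters.
def parseAuxA : List Char → List String
  | [] => []
  | c :: '#' :: rest => String.ofList [c, '#'] :: parseAuxA rest
  | c :: rest => String.ofList [c] :: parseAuxA rest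

def parse (score : String) : List String := parseAuxA score.toList

-- ===== PORT B =====
-- one fold step: merge a '#' into a preceding lone-character token, else append a new token
def stepB (acc : List String) (c : Char) : List String :=
  match acc.getLast? with
  | some t =>
      if c = '#' ∧ t.toList.length = 1 then
        acc.dropLast ++ [String.ofList (t.toList ++ ['#'])]
      else acc ++ [String.ofList [c]]
  | none => acc ++ [String.ofList [c]]

def parse_alt (score : String) : List String := score.toList.foldl stepB []

-- ===== PRECONDITION & SPEC =====
def Spec_parse (score : String) (out : List String) : Prop := out = parse_alt score
instance (score : String) (out : List String) : Decidable (Spec_parse score out) := by unfold Spec_parse; infer_instance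

-- ===== CLAIM (what is proved, stated in full; the proofs are below) =====
def Claim_equal_parse : Prop := ∀ (score : String), Dom_parse score → Spec_parse score (parse score)

-- ===== LEMMAS AND PROOFS =====

-- No merge happens when the incoming char is not '#' or the last token is not a lone char.
lemma stepB_append (acc : List String) (c : Char)
    (h : c = '#' → ∀ t ∈ acc.getLast?, t.toList.length ≠ 1) :
    stepB acc c = acc ++ [String.ofList [c]] := by
  unfold stepB
  cases hl : acc.getLast? with
  | none => rfl
  | some t =>
      simp only [stepB]
      rw [if_neg]
      rintro ⟨hc, hlen⟩
      exact (h hc t (by simp [hl])) hlen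

-- Loop invariant: starting from any accumulator that cannot trigger a merge on the first
-- character, the fold appends exactly what A's tokenizer produces.
lemma foldB_eq (cs : List Char) : ∀ (acc : List String),
    (cs.head? = some '#' → ∀ t ∈ acc.getLast?, t.toList.length ≠ 1) →
    List.foldl stepB acc cs = acc ++ parseAuxA cs := by
  induction cs using parseAuxA.induct with
  | case1 => intro acc _; simp [parseAuxA]
  | case2 c rest ih =>
      intro acc h
      have h1 : stepB acc c = acc ++ [String.ofList [c]] := by
        apply stepB_append
        intro hc t ht
        exact h (by simp [hc]) t ht
      have h2 : stepB (acc ++ [String.ofList [c]]) '#'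
          = acc ++ [String.ofList [c, '#']] := by
        unfold stepB
        simp
      have h3 := ih (acc ++ [String.ofList [c, '#']]) (by simp)
      simp only [List.foldl_cons, h1, h2, h3, parseAuxA]
      simp
  | case3 c rest hne ih =>
      intro acc h
      have h1 : stepB acc c = acc ++ [String.ofList [c]] := by
        apply stepB_append
        intro hc t ht
        exact h (by simp [hc]) t ht
      have hhd : rest.head? = some '#' → ∀ t ∈ (acc ++ [String.ofList [c]]).getLast?, t.toList.length ≠ 1 := by
        intro hr
        cases rest with
        | nil => simp at hr
        | cons r rs =>
            simp at hr
            subst hr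
            exact (hne rs rfl).elim
      have h3 := ih (acc ++ [String.ofList [c]]) hhd
      simp only [List.foldl_cons, h1, h3]
      cases rest with
      | nil => simp [parseAuxA]
      | cons r rs =>
          simp [parseAuxA]

-- ===== VERDICT (by name: the statement is the Claim_ definition above) =====
theorem parse_spec : Claim_equal_parse := by
  intro score _
  unfold Spec_parse parse parse_alt
  rw [foldB_eq score.toList [] (by simp)]
  simp
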